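-- pv_equiv track=rewrite | github.com/haozhigh/model_gpu_cache | script/analyze.py | get_sorted_pcs
-- ===== SOURCE A (Python) =====
-- def get_sorted_pcs(distance_records):
--     ##  Varibale declare
--     pcs = set()
--
--     ##  Iterate over each record
--     for record in distance_records:
--         pc = record[0]
--         pcs.add(pc)
--
--     ##  Convert distances from set to list and sort itself
--     pcs_list = list(pcs)
--     pcs_list.sort()
--
--     ##  Return the sorted distances
--     return pcs_list
-- ===== SOURCE B (Python) =====
-- def get_sorted_pcs(distance_records):
--     ##  Collect all first elements, sort the whole list
--     vals = sorted(record[0] for record in distance_records)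
--
--     ##  One pass: keep each value only when it differs from the previous kept one
--     result = []
--     prev = None
--     for v in vals:
--         if prev is None or v != prev:
--             result.append(v)
--             prev = v
--     return result
-- ===== Notes on version B (the rewrite author's own statement) =====
-- stated objective: alternative
-- what changed: B sorts the raw list of first-elements and removes duplicates in one adjacent-comparison pass with a prev sentinel, instead of A's membership set built first and sorted afterwards.
import Mathlib
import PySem

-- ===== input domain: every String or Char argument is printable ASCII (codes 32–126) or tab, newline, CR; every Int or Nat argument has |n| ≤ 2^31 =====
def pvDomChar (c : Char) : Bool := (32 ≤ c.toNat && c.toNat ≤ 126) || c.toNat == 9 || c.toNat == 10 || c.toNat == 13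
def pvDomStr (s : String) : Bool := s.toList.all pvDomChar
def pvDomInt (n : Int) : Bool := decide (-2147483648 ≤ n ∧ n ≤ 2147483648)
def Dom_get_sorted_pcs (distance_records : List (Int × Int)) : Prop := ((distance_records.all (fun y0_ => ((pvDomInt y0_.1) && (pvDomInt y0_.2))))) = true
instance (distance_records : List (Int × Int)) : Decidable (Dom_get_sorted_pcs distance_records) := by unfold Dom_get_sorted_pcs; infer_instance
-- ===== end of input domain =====

-- B sorts the raw list of first elements and deduplicates in one adjacent-comparison
-- pass with a 'prev' sentinel, instead of A's membership set sorted afterwards (alternative; same cost).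

-- ===== PORT A =====
def get_sorted_pcs (distance_records : List (Int × Int)) : List Int :=
  -- pcs = set(); for record in distance_records: pcs.add(record[0])
  let pcs : PySem.Set Int :=
    distance_records.foldl (fun s record => PySem.Set.add s record.1) PySem.Set.empty
  -- pcs_list = list(pcs); pcs_list.sort()
  PySem.List.sorted pcs (fun x => x) false

-- ===== PORT B =====
def get_sorted_pcs_alt (distance_records : List (Int × Int)) : List Int :=
  -- vals = sorted(record[0] for record in distance_records)
  let vals := PySem.List.sorted (distance_records.map (fun record => record.1)) (fun x => x) false
  -- result = []; prev = None; for v in vals: if prev is None or v != prev: append, prev = v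
  let st := vals.foldl
    (fun (st : List Int × Option Int) v =>
      if st.2 = none ∨ st.2 ≠ some v then (st.1 ++ [v], some v) else st)
    ([], none)
  st.1

-- ===== PRECONDITION & SPEC =====
def Spec_get_sorted_pcs (distance_records : List (Int × Int)) (out : List Int) : Prop := out = get_sorted_pcs_alt distance_records
instance (distance_records : List (Int × Int)) (out : List Int) : Decidable (Spec_get_sorted_pcs distance_records out) := by unfold Spec_get_sorted_pcs; infer_instance

-- ===== CLAIM (what is proved, stated in full; the proofs are below) =====
def Claim_equal_get_sorted_pcs : Prop := ∀ (distance_records : List (Int × Int)), Dom_get_sorted_pcs distance_records → Spec_get_sorted_pcs distance_records (get_sorted_pcs distance_records)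

-- ===== LEMMAS AND PROOFS =====

-- the B loop as a structural recursion on the remaining values
def dedA (prev : Option Int) : List Int → List Int
  | [] => []
  | v :: vs => if prev = none ∨ prev ≠ some v then v :: dedA (some v) vs else dedA prev vs

theorem foldl_eq_dedA (vs : List Int) (acc : List Int) (prev : Option Int) :
    (vs.foldl
      (fun (st : List Int × Option Int) v =>
        if st.2 = none ∨ st.2 ≠ some v then (st.1 ++ [v], some v) else st)
      (acc, prev)).1 = acc ++ dedA prev vs := by
  induction vs generalizing acc prev with
  | nil => simp [dedA]
  | cons v vs ih =>
    by_cases h : prev = none ∨ prev ≠ some v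
    · simp [dedA, h, ih, List.append_assoc]
    · simp [dedA, h, ih]

theorem dedA_subset (vs : List Int) (prev : Option Int) :
    ∀ x ∈ dedA prev vs, x ∈ vs := by
  induction vs generalizing prev with
  | nil => simp [dedA]
  | cons v vs ih =>
    intro x hx
    by_cases h : prev = none ∨ prev ≠ some v
    · simp only [dedA, if_pos h, List.mem_cons] at hx
      rcases hx with h1 | h1
      · simp [h1]
      · exact List.mem_cons_of_mem _ (ih _ _ h1)
    · simp only [dedA, if_neg h] at hx
      exact List.mem_cons_of_mem _ (ih _ _ hx)

theorem mem_dedA_some (vs : List Int) (p : Int) :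
    ∀ x ∈ vs, x ∈ dedA (some p) vs ∨ x = p := by
  induction vs generalizing p with
  | nil => simp
  | cons v vs ih =>
    intro x hx
    by_cases h : v = p
    · subst h
      simp only [dedA, ne_eq, not_true_eq_false, or_false, reduceCtorEq, if_neg, not_false_eq_true]
      rcases List.mem_cons.mp hx with h1 | h1
      · right; exact h1
      · exact ih v x h1
    · have : (some p : Option Int) = none ∨ (some p : Option Int) ≠ some v := by
        right; simp only [ne_eq, Option.some.injEq]; exact fun hc => h hc.symm
      simp only [dedA, if_pos this]
      rcases List.mem_cons.mp hx with h1 | h1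
      · left; simp [h1]
      · rcases ih v x h1 with h2 | h2
        · left; exact List.mem_cons_of_mem _ h2
        · subst h2; left; simp
  
theorem mem_dedA_none (vs : List Int) : ∀ x ∈ vs, x ∈ dedA none vs := by
  cases vs with
  | nil => simp
  | cons v vs =>
    intro x hx
    simp only [dedA]
    rcases List.mem_cons.mp hx with h1 | h1
    · simp [h1]
    · rcases mem_dedA_some vs v x h1 with h2 | h2
      · exact List.mem_cons_of_mem _ h2
      · subst h2; simp

theorem dedA_some_sorted (vs : List Int) (p : Int)
    (hs : vs.Pairwise (· ≤ ·)) (hp : ∀ v ∈ vs, p ≤ v) :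
    (dedA (some p) vs).Pairwise (· < ·) ∧ ∀ x ∈ dedA (some p) vs, p < x := by
  induction vs generalizing p with
  | nil => simp [dedA]
  | cons v vs ih =>
    have hs' := (List.pairwise_cons.mp hs).2
    have hv := (List.pairwise_cons.mp hs).1
    by_cases h : v = p
    · subst h
      simp only [dedA, ne_eq, not_true_eq_false, or_false, reduceCtorEq, if_neg,
        not_false_eq_true]
      exact ih v hs' (fun x hx => hv x hx)
    · have hpv : p < v := lt_of_le_of_ne (hp v (List.mem_cons_self)) (fun hc => h hc.symm)
      have hcond : (some p : Option Int) = none ∨ (some p : Option Int) ≠ some v := by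
        right; simp only [ne_eq, Option.some.injEq]; exact fun hc => h hc.symm
      simp only [dedA, if_pos hcond]
      obtain ⟨h1, h2⟩ := ih v hs' (fun x hx => hv x hx)
      refine ⟨List.pairwise_cons.mpr ⟨fun x hx => h2 x hx, h1⟩, ?_⟩
      intro x hx
      rcases List.mem_cons.mp hx with h3 | h3
      · subst h3; exact hpv
      · exact lt_trans hpv (h2 x h3)

theorem dedA_none_sorted (vs : List Int) (hs : vs.Pairwise (· ≤ ·)) :
    (dedA none vs).Pairwise (· < ·) := by
  cases vs with
  | nil => simp [dedA]
  | cons v vs =>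
    simp only [dedA]
    have hs' := (List.pairwise_cons.mp hs).2
    have hv := (List.pairwise_cons.mp hs).1
    obtain ⟨h1, h2⟩ := dedA_some_sorted vs v hs' hv
    exact List.pairwise_cons.mpr ⟨fun x hx => h2 x hx, h1⟩

theorem dedA_none_nodup (vs : List Int) (hs : vs.Pairwise (· ≤ ·)) :
    (dedA none vs).Nodup :=
  (dedA_none_sorted vs hs).imp (fun h => ne_of_lt h)

-- ===== VERDICT (by name: the statement is the Claim_ definition above) =====
theorem get_sorted_pcs_spec : Claim_equal_get_sorted_pcs := by
  intro records _
  unfold Spec_get_sorted_pcs get_sorted_pcs get_sorted_pcs_alt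
  -- A's loop builds set(map fst records)
  have hset : records.foldl (fun s record => PySem.Set.add s record.1) PySem.Set.empty
      = PySem.Set.ofList (records.map (fun record => record.1)) := by
    rw [← PySem.Set.update_map_eq_foldl_add]; rfl
  simp only [hset]
  set firsts := records.map (fun record => record.1) with hf
  set vals := PySem.List.sorted firsts (fun x => x) false with hv
  have hvp : vals.Perm firsts := PySem.List.sorted_perm ..
  have hvs : vals.Pairwise (· ≤ ·) := PySem.List.sorted_pairwise ..
  rw [foldl_eq_dedA vals [] none, List.nil_append]
  -- dedA none vals is a strictly increasing rearrangement of set(firsts)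
  have hperm : (dedA none vals).Perm (PySem.Set.ofList firsts) := by
    rw [List.perm_ext_iff_of_nodup (dedA_none_nodup vals hvs) (PySem.Set.nodup_ofList _)]
    intro x
    constructor
    · intro hx
      exact (PySem.Set.mem_ofList _ _).mpr (hvp.mem_iff.mp (dedA_subset vals none x hx))
    · intro hx
      exact mem_dedA_none vals x (hvp.mem_iff.mpr ((PySem.Set.mem_ofList _ _).mp hx))
  exact (PySem.List.sorted_eq_of_perm_of_pairwise_lt _ _ (fun x => x) hperm (dedA_none_sorted vals hvs))
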